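-- pv_equiv track=rewrite | github.com/jkruse27/MCXXX | MC102/lab16/lab16.py | linksResposta
-- ===== SOURCE A (Python) =====
-- def linksResposta(links,resp):
-- 	numLinks = []
-- 	for i in range(len(resp)):	#para cada pagina na resp
-- 		marcador = 0
-- 		if resp[i] == 1:		#Se a pagina for relevante analisamos os seus links
-- 			for j in range(len(links)):
-- 					if resp[j] != 0:	#Se a pagina com o link for relevante
-- 						if links[j][i] == 1:	#Se houver o link
-- 							marcador += 1	#Adicionar 1 ao marcador de links
-- 			numLinks.append(marcador)	#adicionar o marcador a numLinks
-- 		elif resp[i] == 0:	#Caso a pagina não seja relevante, adicionamos -1 à numLinks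
-- 			numLinks.append(-1)
--
-- 	return numLinks
-- ===== SOURCE B (Python) =====
-- def linksResposta(links, resp):
--     n = len(resp)
--     counts = [0] * n
--     for j in range(min(len(links), n)):
--         if resp[j] != 0:
--             row = links[j]
--             for i in range(min(len(row), n)):
--                 if row[i] == 1:
--                     counts[i] += 1
--     out = []
--     for i in range(n):
--         if resp[i] == 1:
--             out.append(counts[i])
--         elif resp[i] == 0:
--             out.append(-1)
--     return out
-- ===== Notes on version B (the rewrite author's own statement) =====
-- stated objective: alternative
-- what changed: B replaces A's per-relevant-column rescan of the link matrix by a single accumulation pass that builds a counts table (one increment per 1-entry of a relevant row) followed by a shaped emit pass over resp.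
import Mathlib
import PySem

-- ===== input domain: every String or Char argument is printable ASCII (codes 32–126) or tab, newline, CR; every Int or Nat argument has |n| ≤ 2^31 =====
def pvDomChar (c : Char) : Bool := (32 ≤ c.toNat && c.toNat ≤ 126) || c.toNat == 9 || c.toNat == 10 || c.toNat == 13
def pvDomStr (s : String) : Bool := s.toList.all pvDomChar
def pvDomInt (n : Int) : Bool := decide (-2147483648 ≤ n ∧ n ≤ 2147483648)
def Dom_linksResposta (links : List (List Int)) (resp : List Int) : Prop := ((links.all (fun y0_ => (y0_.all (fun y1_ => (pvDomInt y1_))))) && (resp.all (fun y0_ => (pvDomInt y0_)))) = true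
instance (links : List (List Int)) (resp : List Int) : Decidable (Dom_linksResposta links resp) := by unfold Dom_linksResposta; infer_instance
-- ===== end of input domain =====

-- B builds a counts table in one accumulation pass over the relevant rows instead of
-- rescanning the whole matrix for every relevant page (objective: alternative decomposition).

-- ===== PORT A =====
-- Literal transliteration of A: for each i, if resp[i]==1 rescan all rows counting links,
-- elif resp[i]==0 append -1.  Indexing is via getD; Pre_ guarantees every read is in range.
def linksResposta (links : List (List Int)) (resp : List Int) : List Int :=
  (List.range resp.length).foldl (fun numLinks i =>
    if resp.getD i 0 = 1 then
      numLinks ++ [(List.range links.length).foldl (fun marcador j =>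
        if resp.getD j 0 ≠ 0 then
          if (links.getD j []).getD i 0 = 1 then marcador + 1 else marcador
        else marcador) 0]
    else if resp.getD i 0 = 0 then numLinks ++ [-1] else numLinks) []

-- ===== PORT B =====
-- Literal transliteration of Source B: accumulate counts (list of length n, in-place increments
-- via modify), then emit counts[i] / -1 following resp.
def linksResposta_alt (links : List (List Int)) (resp : List Int) : List Int :=
  let n := resp.length
  let counts := (List.range (min links.length n)).foldl (fun c j =>
    if resp.getD j 0 ≠ 0 then
      let row := links.getD j []
      (List.range (min row.length n)).foldl (fun c i =>
        if row.getD i 0 = 1 then c.modify i (· + 1) else c) c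
    else c) (List.replicate n (0 : Int))
  (List.range n).foldl (fun out i =>
    if resp.getD i 0 = 1 then out ++ [counts.getD i 0]
    else if resp.getD i 0 = 0 then out ++ [-1] else out) []

-- ===== PRECONDITION & SPEC =====
-- Pre_ excludes exactly the inputs on which Python's A raises IndexError: resp contains a 1
-- and either links is longer than resp (resp[j] read out of range) or some row of a page
-- with nonzero resp is shorter than a relevant index (links[j][i] out of range).
def Pre_linksResposta (links : List (List Int)) (resp : List Int) : Prop :=
  (1 : Int) ∈ resp →
    (links.length ≤ resp.length ∧
     ∀ j < links.length, resp.getD j 0 ≠ 0 →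
       ∀ i < resp.length, resp.getD i 0 = 1 → i < (links.getD j []).length)
instance (links : List (List Int)) (resp : List Int) : Decidable (Pre_linksResposta links resp) := by
  unfold Pre_linksResposta; infer_instance
def pvWitness_linksResposta : List (List Int) × List Int := ([[1, 0], [0, 1]], [1, 1])

def Spec_linksResposta (links : List (List Int)) (resp : List Int) (out : List Int) : Prop := out = linksResposta_alt links resp
instance (links : List (List Int)) (resp : List Int) (out : List Int) : Decidable (Spec_linksResposta links resp out) := by unfold Spec_linksResposta; infer_instance

-- ===== CLAIM (what is proved, stated in full; the proofs are below) =====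
def Claim_equal_linksResposta : Prop := ∀ (links : List (List Int)) (resp : List Int), Dom_linksResposta links resp → Pre_linksResposta links resp → Spec_linksResposta links resp (linksResposta links resp)
-- ===== LEMMAS AND PROOFS =====

-- folds with the same effect on every member of the list agree
theorem pv_foldl_congr_mem {α β : Type} (l : List α) (f g : β → α → β) (init : β)
    (h : ∀ acc x, x ∈ l → f acc x = g acc x) : l.foldl f init = l.foldl g init := by
  induction l generalizing init with
  | nil => rfl
  | cons a t ih =>
      simp only [List.foldl_cons]
      rw [h init a (by simp)]
      exact ih _ (fun acc x hx => h acc x (by simp [hx]))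

-- A's counting fold as a sum
theorem pv_count_fold (p q : Nat → Prop) [DecidablePred p] [DecidablePred q]
    (js : List Nat) (m : Int) :
    js.foldl (fun m j => if p j then (if q j then m + 1 else m) else m) m
      = m + (js.map (fun j => if p j ∧ q j then (1 : Int) else 0)).sum := by
  induction js generalizing m with
  | nil => simp
  | cons a t ih =>
      simp only [List.foldl_cons, List.map_cons, List.sum_cons, ih]
      by_cases hp : p a <;> by_cases hq : q a <;> simp [hp, hq] <;> ring

-- getD after an in-place increment at k
theorem pv_getD_modify (l : List Int) (k i : Nat) :
    (l.modify k (· + 1)).getD i 0 = l.getD i 0 + (if i = k ∧ i < l.length then 1 else 0) := by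
  unfold List.getD
  rw [List.getElem?_modify]
  by_cases him : i = k
  · subst him
    by_cases hic : i < l.length
    · rw [List.getElem?_eq_getElem hic]
      simp [hic]
    · rw [List.getElem?_eq_none (by omega)]
      simp [hic]
  · cases h : l[i]? <;> simp [Ne.symm him, him]

-- the inner increment fold preserves length
theorem pv_inner_len (row : List Int) (m : Nat) (c : List Int) :
    ((List.range m).foldl (fun c i => if row.getD i 0 = 1 then c.modify i (· + 1) else c) c).length
      = c.length := by
  induction m generalizing c with
  | zero => rfl
  | succ m ih =>
      rw [List.range_succ, List.foldl_append, List.foldl_cons, List.foldl_nil]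
      split
      · rw [List.length_modify, ih]
      · exact ih c

-- pointwise value of the inner increment fold
theorem pv_inner_getD (row : List Int) (m : Nat) (c : List Int) (i : Nat) :
    ((List.range m).foldl (fun c i => if row.getD i 0 = 1 then c.modify i (· + 1) else c) c).getD i 0
      = c.getD i 0 + (if i < m ∧ i < c.length ∧ row.getD i 0 = 1 then 1 else 0) := by
  induction m generalizing c with
  | zero => simp
  | succ m ih =>
      rw [List.range_succ, List.foldl_append, List.foldl_cons, List.foldl_nil]
      by_cases hr : row.getD m 0 = 1
      · rw [if_pos hr, pv_getD_modify, ih, pv_inner_len]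
        by_cases him : i = m
        · subst him
          by_cases h2 : i < c.length
          · rw [if_neg (show ¬(i < i ∧ i < c.length ∧ row.getD i 0 = 1) by rintro ⟨h, -⟩; omega),
                if_pos (show i = i ∧ i < c.length from ⟨rfl, h2⟩),
                if_pos (show i < i + 1 ∧ i < c.length ∧ row.getD i 0 = 1 from ⟨Nat.lt_succ_self i, h2, hr⟩)]
            ring
          · rw [if_neg (show ¬(i < i ∧ i < c.length ∧ row.getD i 0 = 1) by rintro ⟨-, h, -⟩; exact h2 h),
                if_neg (show ¬(i = i ∧ i < c.length) by rintro ⟨-, h⟩; exact h2 h),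
                if_neg (show ¬(i < i + 1 ∧ i < c.length ∧ row.getD i 0 = 1) by rintro ⟨-, h, -⟩; exact h2 h)]
            ring
        · have hiff : (i < m + 1) ↔ i < m := by omega
          have hnm : ¬(i = m ∧ i < c.length) := by rintro ⟨h, -⟩; exact him h
          rw [if_neg hnm]
          simp only [hiff]
          ring
      · rw [if_neg hr, ih]
        by_cases him : i = m
        · subst him
          rw [if_neg (show ¬(i < i ∧ i < c.length ∧ row.getD i 0 = 1) by rintro ⟨h, -⟩; omega),
             if_neg (show ¬(i < i + 1 ∧ i < c.length ∧ row.getD i 0 = 1) by rintro ⟨-, -, h⟩; exact hr h)]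
        · have hiff : (i < m + 1) ↔ i < m := by omega
          simp only [hiff]

-- the outer accumulation fold: pointwise value as a sum over the rows
theorem pv_outer_getD (links : List (List Int)) (resp : List Int) (n : Nat)
    (js : List Nat) (c : List Int) (i : Nat) :
    (js.foldl (fun c j =>
        if resp.getD j 0 ≠ 0 then
          (List.range (min (links.getD j []).length n)).foldl (fun c i =>
            if (links.getD j []).getD i 0 = 1 then c.modify i (· + 1) else c) c
        else c) c).getD i 0
      = c.getD i 0 + (js.map (fun j =>
          if resp.getD j 0 ≠ 0 ∧ i < min (links.getD j []).length n ∧ i < c.length ∧ (links.getD j []).getD i 0 = 1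
          then (1 : Int) else 0)).sum := by
  induction js generalizing c with
  | nil => simp
  | cons a t ih =>
      simp only [List.foldl_cons, List.map_cons, List.sum_cons]
      by_cases hp : resp.getD a 0 ≠ 0
      · rw [if_pos hp, ih, pv_inner_getD, pv_inner_len]
        by_cases h : i < min (links.getD a []).length n ∧ i < c.length ∧ (links.getD a []).getD i 0 = 1
        · rw [if_pos h, if_pos ⟨hp, h⟩]
          ring
        · rw [if_neg h, if_neg (fun hh => h hh.2)]
          ring
      · rw [if_neg hp, ih]
        rw [if_neg (show ¬(resp.getD a 0 ≠ 0 ∧ i < min (links.getD a []).length n ∧ i < c.length ∧ (links.getD a []).getD i 0 = 1) by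
          rintro ⟨h, -⟩; exact hp h)]
        ring

-- per-row contributions of A and B are equal (for i < n)
theorem pv_term_eq (links : List (List Int)) (resp : List Int) (i j : Nat)
    (hi : i < resp.length) :
    (if resp.getD j 0 ≠ 0 ∧ (links.getD j []).getD i 0 = 1 then (1 : Int) else 0)
      = (if resp.getD j 0 ≠ 0 ∧ i < min (links.getD j []).length resp.length ∧ i < resp.length ∧ (links.getD j []).getD i 0 = 1
         then (1 : Int) else 0) := by
  by_cases hp : resp.getD j 0 ≠ 0
  · by_cases hq : (links.getD j []).getD i 0 = 1
    · have hrow : i < (links.getD j []).length := by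
        by_contra h
        rw [List.getD_eq_default _ _ (by omega)] at hq
        exact absurd hq (by norm_num)
      rw [if_pos ⟨hp, hq⟩, if_pos ⟨hp, Nat.lt_min.mpr ⟨hrow, hi⟩, hi, hq⟩]
    · rw [if_neg (fun h => hq h.2), if_neg (fun h => hq h.2.2.2)]
  · rw [if_neg (fun h => hp h.1), if_neg (fun h => hp h.1)]

-- rows beyond resp.length contribute nothing to A's count
theorem pv_tail_zero (links : List (List Int)) (resp : List Int) (i : Nat) (j : Nat)
    (hj : resp.length ≤ j) :
    (if resp.getD j 0 ≠ 0 ∧ (links.getD j []).getD i 0 = 1 then (1 : Int) else 0) = 0 := by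
  rw [List.getD_eq_default _ _ hj]
  simp

-- B's counts table agrees with A's per-column recount
theorem pv_counts_eq (links : List (List Int)) (resp : List Int) (i : Nat)
    (hi : i < resp.length) :
    ((List.range (min links.length resp.length)).foldl (fun c j =>
        if resp.getD j 0 ≠ 0 then
          (List.range (min (links.getD j []).length resp.length)).foldl (fun c i =>
            if (links.getD j []).getD i 0 = 1 then c.modify i (· + 1) else c) c
        else c) (List.replicate resp.length (0 : Int))).getD i 0
      = (List.range links.length).foldl (fun marcador j =>
          if resp.getD j 0 ≠ 0 then
            if (links.getD j []).getD i 0 = 1 then marcador + 1 else marcador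
          else marcador) 0 := by
  have hrep : (List.replicate resp.length (0 : Int)).getD i 0 = 0 := by
    by_cases h : i < resp.length <;>
      simp [List.getD, List.getElem?_replicate, h]
  rw [pv_outer_getD, pv_count_fold (fun j => resp.getD j 0 ≠ 0)
        (fun j => (links.getD j []).getD i 0 = 1), hrep, zero_add, zero_add]
  simp only [List.length_replicate]
  rw [List.map_congr_left (fun j _ => (pv_term_eq links resp i j hi).symm)]
  rcases Nat.le_total links.length resp.length with hLn | hnL
  · rw [Nat.min_eq_left hLn]
  · rw [Nat.min_eq_right hnL]
    have hr : List.range links.length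
        = List.range resp.length ++ (List.range (links.length - resp.length)).map (fun x => resp.length + x) := by
      rw [← List.range_add]
      congr 1
      omega
    conv_rhs => rw [hr]
    rw [List.map_append, List.sum_append]
    have htail : ((List.map (fun x => resp.length + x) (List.range (links.length - resp.length))).map
        (fun j => if resp.getD j 0 ≠ 0 ∧ (links.getD j []).getD i 0 = 1 then (1 : Int) else 0)).sum = 0 := by
      apply List.sum_eq_zero
      intro x hx
      simp only [List.mem_map] at hx
      obtain ⟨y, ⟨z, _, rfl⟩, rfl⟩ := hx
      exact pv_tail_zero links resp i _ (by omega)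
    rw [htail, add_zero]

-- ===== VERDICT (by name: the statement is the Claim_ definition above) =====
theorem linksResposta_spec : Claim_equal_linksResposta := by
  intro links resp _ _
  unfold Spec_linksResposta linksResposta linksResposta_alt
  apply pv_foldl_congr_mem
  intro acc i hi
  rw [List.mem_range] at hi
  by_cases h1 : resp.getD i 0 = 1
  · rw [if_pos h1, if_pos h1, pv_counts_eq links resp i hi]
  · rw [if_neg h1, if_neg h1]
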